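-- pv_equiv track=rewrite | github.com/MinakamiMario/Cryptogem | strategies/superhf/harness_s3.py | build_hour_to_15m_map
-- ===== SOURCE A (Python) =====
-- def build_hour_to_15m_map(
--     candles_1h: list[dict],
--     candles_15m: list[dict],
-- ) -> dict[int, list[int]]:
--     """Build mapping from 1H bar index -> list of 15m bar indices within that hour.
--
--     For each 1H bar at index `i` with timestamp T, we find all 15m bars
--     whose timestamp falls in [T, T + 3600).
--
--     Returns dict[int, list[int]] where keys are 1H bar indices and
--     values are lists of 15m bar indices, sorted chronologically.
--     """
--     if not candles_1h or not candles_15m: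
--         return {}
--
--     # Build sorted list of (timestamp, 15m_index) for binary search
--     ts_15m = [(c['time'], idx) for idx, c in enumerate(candles_15m)]
--     ts_15m.sort(key=lambda x: x[0])
--     ts_15m_only = [t[0] for t in ts_15m]
--
--     import bisect
--
--     hour_map: dict[int, list[int]] = {}
--     for i, c1h in enumerate(candles_1h):
--         t_start = c1h['time']
--         t_end = t_start + 3600
--
--         lo = bisect.bisect_left(ts_15m_only, t_start)
--         hi = bisect.bisect_left(ts_15m_only, t_end)
--
--         indices = [ts_15m[j][1] for j in range(lo, hi)]
--         hour_map[i] = indices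
--
--     return hour_map
-- ===== SOURCE B (Python) =====
-- def build_hour_to_15m_map(
--     candles_1h: list[dict],
--     candles_15m: list[dict],
-- ) -> dict[int, list[int]]:
--     """Inverted-loop build: pre-create every hour's (empty) bucket, then make a
--     single pass over the time-sorted 15m bars, appending each bar's index to the
--     bucket of every hour whose [t0, t0+3600) window contains it."""
--     if not candles_1h or not candles_15m:
--         return {}
--     starts = [c['time'] for c in candles_1h]
--     hour_map = {i: [] for i in range(len(candles_1h))}
--     for t, idx in sorted(((c['time'], j) for j, c in enumerate(candles_15m)),
--                          key=lambda p: p[0]):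
--         for i, t0 in enumerate(starts):
--             if t0 <= t < t0 + 3600:
--                 hour_map[i].append(idx)
--     return hour_map
-- ===== Notes on version B (the rewrite author's own statement) =====
-- stated objective: alternative
-- what changed: B inverts the loop structure: instead of A's per-hour bisect window over a sorted timestamp array, B pre-creates an empty bucket per 1H bar and makes one pass over the time-sorted 15m bars, appending each index to every hour bucket whose [t0, t0+3600) window contains it.
import Mathlib
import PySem

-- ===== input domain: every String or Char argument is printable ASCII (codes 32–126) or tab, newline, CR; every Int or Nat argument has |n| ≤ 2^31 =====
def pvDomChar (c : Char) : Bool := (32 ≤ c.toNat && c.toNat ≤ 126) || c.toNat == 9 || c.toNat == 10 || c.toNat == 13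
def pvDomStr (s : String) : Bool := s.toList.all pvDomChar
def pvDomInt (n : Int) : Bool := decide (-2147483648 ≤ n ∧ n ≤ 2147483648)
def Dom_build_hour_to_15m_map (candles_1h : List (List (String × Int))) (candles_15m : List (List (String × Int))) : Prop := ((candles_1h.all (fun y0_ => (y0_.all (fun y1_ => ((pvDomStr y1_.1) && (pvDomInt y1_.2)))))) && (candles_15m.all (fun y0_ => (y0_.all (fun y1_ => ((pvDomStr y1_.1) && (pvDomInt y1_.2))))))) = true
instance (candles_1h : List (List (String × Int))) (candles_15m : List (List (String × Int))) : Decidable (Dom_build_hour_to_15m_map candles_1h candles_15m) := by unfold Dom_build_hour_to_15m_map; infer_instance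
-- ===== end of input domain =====

-- ===== PORT A =====
-- B inverts the loops: one pass over the sorted 15m bars filling per-hour buckets (alternative).
-- c['time'] used by BOTH ports (the same lookup in A and B); .getD 0 is exact under Pre_
-- (the key is present wherever a lookup happens).
def pvTime (c : List (String × Int)) : Int :=
  ((PySem.Dict.ofList c).get? "time").getD 0

-- literal port of A: sort (time, idx) pairs, then per 1H bar two bisect_left calls and a
-- range(lo,hi) slice.  range(lo,hi) = List.range' lo (hi-lo) (Nat subtraction = Python's empty
-- range when hi < lo); ts_15m[j] ported as getD with an unused default, exact since j < length.
def build_hour_to_15m_map (candles_1h : List (List (String × Int))) (candles_15m : List (List (String × Int))) : List (Int × List Int) :=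
  if candles_1h = [] ∨ candles_15m = [] then []
  else
    let ts_15m := PySem.List.sorted ((PySem.List.enumerate candles_15m).map (fun p => (pvTime p.2, p.1))) (fun x => x.1)
    let ts_15m_only := ts_15m.map (fun t => t.1)
    (PySem.List.enumerate candles_1h).map (fun p =>
      let t_start := pvTime p.2
      let t_end := t_start + 3600
      let lo := PySem.List.bisectLeft ts_15m_only t_start
      let hi := PySem.List.bisectLeft ts_15m_only t_end
      (p.1, (List.range' lo (hi - lo)).map (fun j => (ts_15m.getD j (0, 0)).2)))

-- ===== PORT B =====
-- literal port of B: dict of empty buckets keyed by range(len(candles_1h)), then a fold over the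
-- sorted (time, idx) pairs with an inner fold over enumerate(starts) appending idx to each
-- matching bucket (hour_map[i].append(idx) = Dict.modify, exact since every key i is present).
def build_hour_to_15m_map_alt (candles_1h : List (List (String × Int))) (candles_15m : List (List (String × Int))) : List (Int × List Int) :=
  if candles_1h = [] ∨ candles_15m = [] then []
  else
    let starts := candles_1h.map pvTime
    let init : PySem.Dict Int (List Int) :=
      (PySem.List.pyRange 0 (candles_1h.length : Int)).foldl (fun d i => d.insert i []) PySem.Dict.empty
    let pairs := PySem.List.sorted ((PySem.List.enumerate candles_15m).map (fun p => (pvTime p.2, p.1))) (fun x => x.1)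
    (pairs.foldl (fun d q =>
        (PySem.List.enumerate starts).foldl (fun d p =>
          if decide (p.2 ≤ q.1) && decide (q.1 < p.2 + 3600) then d.modify p.1 [] (· ++ [q.2]) else d) d)
      init).items

-- ===== PRECONDITION & SPEC =====
-- Pre_ excludes only inputs where A (and B) raise KeyError: a candle without a 'time' key,
-- reached only when both lists are nonempty (otherwise no lookup happens and A returns {}).
def Pre_build_hour_to_15m_map (candles_1h : List (List (String × Int))) (candles_15m : List (List (String × Int))) : Prop :=
  candles_1h = [] ∨ candles_15m = [] ∨
    ((∀ c ∈ candles_1h, "time" ∈ c.map Prod.fst) ∧ (∀ c ∈ candles_15m, "time" ∈ c.map Prod.fst))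
instance (candles_1h : List (List (String × Int))) (candles_15m : List (List (String × Int))) : Decidable (Pre_build_hour_to_15m_map candles_1h candles_15m) := by unfold Pre_build_hour_to_15m_map; infer_instance

def pvWitness_build_hour_to_15m_map : (List (List (String × Int))) × (List (List (String × Int))) :=
  ([[("time", 7200)]], [[("time", 7200)], [("time", 8100)], [("time", 0)]])

def Spec_build_hour_to_15m_map (candles_1h : List (List (String × Int))) (candles_15m : List (List (String × Int))) (out : List (Int × List Int)) : Prop := out = build_hour_to_15m_map_alt candles_1h candles_15m
instance (candles_1h : List (List (String × Int))) (candles_15m : List (List (String × Int))) (out : List (Int × List Int)) : Decidable (Spec_build_hour_to_15m_map candles_1h candles_15m out) := by unfold Spec_build_hour_to_15m_map; infer_instance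

-- ===== CLAIM (what is proved, stated in full; the proofs are below) =====
def Claim_equal_build_hour_to_15m_map : Prop := ∀ (candles_1h : List (List (String × Int))) (candles_15m : List (List (String × Int))), Dom_build_hour_to_15m_map candles_1h candles_15m → Pre_build_hour_to_15m_map candles_1h candles_15m → Spec_build_hour_to_15m_map candles_1h candles_15m (build_hour_to_15m_map candles_1h candles_15m)

-- ===== LEMMAS AND PROOFS =====

-- ---- A-side: the bisect window of the sorted pairs is their filter by [t0, t0+3600) ----

-- the first element NOT in the takeWhile prefix fails the predicate
theorem pv_tw_at {α : Type} (p : α → Bool) (l : List α)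
    (h : (l.takeWhile p).length < l.length) : ¬ p (l[(l.takeWhile p).length]) := by
  have e : l = l.takeWhile p ++ l.dropWhile p := (List.takeWhile_append_dropWhile).symm
  have hlen := congrArg List.length e
  simp only [List.length_append] at hlen
  have hd : 0 < (l.dropWhile p).length := by omega
  have hg := List.getElem_of_eq e (i := (l.takeWhile p).length) h
  rw [List.getElem_append_right (le_refl _)] at hg
  simp only [Nat.sub_self] at hg
  rw [hg]
  simpa [List.get] using List.dropWhile_get_zero_not p l hd

-- elements inside the takeWhile prefix satisfy the predicate
theorem pv_tw_in {α : Type} (p : α → Bool) (l : List α) (i : Nat)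
    (hl : i < l.length) (h : i < (l.takeWhile p).length) : p l[i] := by
  have h1 := List.mem_takeWhile_imp (l := l) (p := p) (List.getElem_mem h)
  rwa [(List.takeWhile_prefix p).getElem h] at h1

-- bisect_left on a sorted list is the length of the strict prefix of elements < x
theorem bisectLeft_eq_length_takeWhile (xs : List Int) (x : Int)
    (hs : List.Pairwise (fun a b => a ≤ b) xs) :
    PySem.List.bisectLeft xs x = (xs.takeWhile (fun t => decide (t < x))).length := by
  obtain ⟨hle, hlt, hge⟩ := PySem.List.bisectLeft_spec xs x hs
  have hm : (xs.takeWhile (fun t => decide (t < x))).length ≤ xs.length :=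
    List.Sublist.length_le (List.takeWhile_sublist _)
  rcases Nat.lt_trichotomy (PySem.List.bisectLeft xs x)
      (xs.takeWhile (fun t => decide (t < x))).length with h | h | h
  · have h1 : x ≤ xs[PySem.List.bisectLeft xs x]'(by omega) :=
      hge _ (by omega) (le_refl _)
    have h2 := pv_tw_in (fun t => decide (t < x)) xs (PySem.List.bisectLeft xs x) (by omega) h
    simp only [decide_eq_true_eq] at h2
    omega
  · exact h
  · have h1 := hlt _ (by omega) h
    have h2 := pv_tw_at (fun t => decide (t < x)) xs (by omega)
    simp only [decide_eq_true_eq] at h2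
    omega

-- indexing over range(s, s+n) is drop/take
theorem range'_map_getD {α : Type} (l : List α) (d : α) :
    ∀ (n s : Nat), s + n ≤ l.length →
    (List.range' s n).map (fun j => l.getD j d) = (l.drop s).take n := by
  intro n
  induction n with
  | zero => intro s _; simp
  | succ k ih =>
    intro s hs
    have hsl : s < l.length := by omega
    rw [List.range'_succ, List.map_cons, ih (s + 1) (by omega),
        ← List.getElem_cons_drop hsl, List.take_succ_cons, List.getD_eq_getElem l d hsl]

-- the bisect window of a fst-sorted list is its filter by the half-open interval [a, b)
theorem window_eq_filter (a b : Int) (hab : a ≤ b) :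
    ∀ (l : List (Int × Int)), List.Pairwise (fun p q => p.1 ≤ q.1) l →
    (l.drop (l.takeWhile (fun q => decide (q.1 < a))).length).take
        ((l.takeWhile (fun q => decide (q.1 < b))).length - (l.takeWhile (fun q => decide (q.1 < a))).length)
      = l.filter (fun q => decide (a ≤ q.1) && decide (q.1 < b)) := by
  intro l
  induction l with
  | nil => intro _; rfl
  | cons x t ih =>
    intro hp
    rw [List.pairwise_cons] at hp
    obtain ⟨hx, ht⟩ := hp
    by_cases h1 : x.1 < a
    · have h2 : x.1 < b := by omega
      rw [List.takeWhile_cons_of_pos (p := fun q : Int × Int => decide (q.1 < a)) (by simpa using h1),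
          List.takeWhile_cons_of_pos (p := fun q : Int × Int => decide (q.1 < b)) (by simpa using h2)]
      simp only [List.length_cons, List.drop_succ_cons, Nat.succ_sub_succ]
      rw [List.filter_cons_of_neg (by simp; omega)]
      exact ih ht
    · have htwa : t.takeWhile (fun q => decide (q.1 < a)) = [] := by
        rw [List.takeWhile_eq_nil_iff]
        intro hl
        have := hx (t.get ⟨0, hl⟩) (List.get_mem t ⟨0, hl⟩)
        simp only [decide_eq_true_eq]
        omega
      rw [List.takeWhile_cons_of_neg (p := fun q : Int × Int => decide (q.1 < a)) (by simp; omega)]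
      simp only [List.length_nil, List.drop_zero, Nat.sub_zero]
      by_cases h2 : x.1 < b
      · rw [List.takeWhile_cons_of_pos (p := fun q : Int × Int => decide (q.1 < b)) (by simpa using h2)]
        simp only [List.length_cons, List.take_succ_cons]
        rw [List.filter_cons_of_pos (by simp; omega)]
        congr 1
        have h3 := ih ht
        rw [htwa] at h3
        simpa using h3
      · rw [List.takeWhile_cons_of_neg (p := fun q : Int × Int => decide (q.1 < b)) (by simp; omega)]
        simp only [List.length_nil, List.take_zero]
        symm
        rw [List.filter_eq_nil_iff]
        intro y hy
        rcases List.mem_cons.1 hy with rfl | hyt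
        · simp; omega
        · have := hx y hyt
          simp; omega

-- per-hour equality: A's bisect window slice equals the linear filter of the sorted pairs
theorem hour_eq (ts : List (Int × Int)) (hs : List.Pairwise (fun p q => p.1 ≤ q.1) ts) (t0 : Int) :
    (List.range' (PySem.List.bisectLeft (ts.map (fun t => t.1)) t0)
        (PySem.List.bisectLeft (ts.map (fun t => t.1)) (t0 + 3600) -
         PySem.List.bisectLeft (ts.map (fun t => t.1)) t0)).map (fun j => (ts.getD j (0, 0)).2)
      = (ts.filter (fun q => decide (t0 ≤ q.1) && decide (q.1 < t0 + 3600))).map (fun q => q.2) := by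
  have hsm : List.Pairwise (fun a b => a ≤ b) (ts.map (fun t => t.1)) :=
    (List.pairwise_map).2 hs
  have e1 := bisectLeft_eq_length_takeWhile (ts.map (fun t => t.1)) t0 hsm
  have e2 := bisectLeft_eq_length_takeWhile (ts.map (fun t => t.1)) (t0 + 3600) hsm
  rw [List.takeWhile_map, List.length_map] at e1 e2
  simp only [Function.comp_def] at e1 e2
  rw [e1, e2]
  have hla : ((ts.takeWhile (fun q => decide (q.1 < t0))).length) ≤ ts.length :=
    List.Sublist.length_le (List.takeWhile_sublist _)
  have hlb : ((ts.takeWhile (fun q => decide (q.1 < t0 + 3600))).length) ≤ ts.length :=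
    List.Sublist.length_le (List.takeWhile_sublist _)
  have h3 : (List.range' ((ts.takeWhile (fun q => decide (q.1 < t0))).length)
        ((ts.takeWhile (fun q => decide (q.1 < t0 + 3600))).length -
         (ts.takeWhile (fun q => decide (q.1 < t0))).length)).map (fun j => (ts.getD j (0, 0)).2)
      = ((List.range' ((ts.takeWhile (fun q => decide (q.1 < t0))).length)
        ((ts.takeWhile (fun q => decide (q.1 < t0 + 3600))).length -
         (ts.takeWhile (fun q => decide (q.1 < t0))).length)).map (fun j => ts.getD j (0, 0))).map (fun q => q.2) := by
    rw [List.map_map]; rfl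
  rw [h3, range'_map_getD ts (0, 0) _ _ (by omega),
      window_eq_filter t0 (t0 + 3600) (by omega) ts hs]

-- ---- B-side: the double fold of conditional bucket-appends computes the same filters ----

-- abbreviations for B's two loop bodies (proof-local)
def pvInner (q : Int × Int) (d : PySem.Dict Int (List Int)) (hours : List (Int × Int)) : PySem.Dict Int (List Int) :=
  hours.foldl (fun d p =>
    if decide (p.2 ≤ q.1) && decide (q.1 < p.2 + 3600) then d.modify p.1 [] (· ++ [q.2]) else d) d

-- enumerate over a map
theorem pv_enumerate_map {α β : Type} (f : α → β) :
    ∀ (l : List α) (s : Int),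
    PySem.List.enumerate (l.map f) s = (PySem.List.enumerate l s).map (fun p => (p.1, f p.2)) := by
  intro l
  induction l with
  | nil => intro s; rfl
  | cons x t ih => intro s; simp [PySem.List.enumerate, ih (s + 1)]

-- the first components of enumerate l s
theorem pv_enumerate_fst {α : Type} :
    ∀ (l : List α) (s : Int),
    (PySem.List.enumerate l s).map Prod.fst = (List.range l.length).map (fun k => s + Int.ofNat k) := by
  intro l
  induction l with
  | nil => intro s; rfl
  | cons x t ih =>
    intro s
    rw [show PySem.List.enumerate (x :: t) s = (s, x) :: PySem.List.enumerate t (s + 1) from rfl]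
    rw [List.map_cons, ih (s + 1), List.length_cons, List.range_succ_eq_map, List.map_cons,
      List.map_map]
    refine List.cons_eq_cons.mpr ⟨by simp, ?_⟩
    apply List.map_congr_left
    intro k _
    simp only [Function.comp_apply, Nat.succ_eq_add_one, Int.ofNat_eq_natCast]
    push_cast
    ring

-- one step of the inner fold
theorem pvInner_cons (q : Int × Int) (d : PySem.Dict Int (List Int)) (p : Int × Int) (t : List (Int × Int)) :
    pvInner q d (p :: t)
      = pvInner q (if decide (p.2 ≤ q.1) && decide (q.1 < p.2 + 3600) then d.modify p.1 [] (· ++ [q.2]) else d) t := rfl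

-- the inner fold does not touch a key outside hours
theorem pv_inner_getD_notmem (q : Int × Int) (i : Int) :
    ∀ (hours : List (Int × Int)) (d : PySem.Dict Int (List Int)),
    i ∉ hours.map Prod.fst → (pvInner q d hours).getD i [] = d.getD i [] := by
  intro hours
  induction hours with
  | nil => intro d _; rfl
  | cons p t ih =>
    intro d hm
    simp only [List.map_cons, List.mem_cons, not_or] at hm
    rw [pvInner_cons]
    split_ifs with hc
    · rw [ih _ hm.2, PySem.Dict.getD_modify_of_ne _ _ _ hm.1]
    · exact ih _ hm.2

-- the inner fold appends q.2 to bucket i exactly when q.1 falls in [t0, t0+3600)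
theorem pv_inner_getD_mem (q : Int × Int) (i t0 : Int) :
    ∀ (hours : List (Int × Int)) (d : PySem.Dict Int (List Int)),
    (hours.map Prod.fst).Nodup → (i, t0) ∈ hours →
    (pvInner q d hours).getD i []
      = if decide (t0 ≤ q.1) && decide (q.1 < t0 + 3600) then d.getD i [] ++ [q.2] else d.getD i [] := by
  intro hours
  induction hours with
  | nil => intro d _ hm; cases hm
  | cons p t ih =>
    intro d hnd hm
    simp only [List.map_cons, List.nodup_cons] at hnd
    rw [pvInner_cons]
    rcases List.mem_cons.1 hm with rfl | hmt
    · have hnot : (i : Int) ∉ t.map Prod.fst := by simpa using hnd.1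
      by_cases hc : (decide (t0 ≤ q.1) && decide (q.1 < t0 + 3600)) = true
      · rw [if_pos hc, if_pos hc, pv_inner_getD_notmem q i t _ hnot, PySem.Dict.getD_modify_self]
      · rw [if_neg hc, if_neg hc]
        exact pv_inner_getD_notmem q i t _ hnot
    · have hne : i ≠ p.1 := by
        intro h; exact hnd.1 (h ▸ (List.mem_map.2 ⟨(i, t0), hmt, by rw [h]⟩))
      by_cases hc : (decide (p.2 ≤ q.1) && decide (q.1 < p.2 + 3600)) = true
      · rw [if_pos hc, ih _ hnd.2 hmt, PySem.Dict.getD_modify_of_ne _ _ _ hne]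
      · rw [if_neg hc]
        exact ih _ hnd.2 hmt

-- the inner fold preserves the key list
theorem pv_inner_keys (q : Int × Int) :
    ∀ (hours : List (Int × Int)) (d : PySem.Dict Int (List Int)),
    (∀ p ∈ hours, p.1 ∈ d.keys) → (pvInner q d hours).keys = d.keys := by
  intro hours
  induction hours with
  | nil => intro d _; rfl
  | cons p t ih =>
    intro d hk
    rw [pvInner_cons]
    split_ifs with hc
    · have hck : d.contains p.1 = true := by
        rw [PySem.Dict.contains_eq_decide_mem_keys]
        exact decide_eq_true (hk p (List.mem_cons_self))
      have hkeq : (d.modify p.1 [] (· ++ [q.2])).keys = d.keys := by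
        rw [PySem.Dict.keys_modify, PySem.Dict.keys_insert_of_contains _ _ hck]
      have := ih (d.modify p.1 [] (· ++ [q.2]))
        (fun r hr => by rw [hkeq]; exact hk r (List.mem_cons_of_mem _ hr))
      rw [this, hkeq]
    · exact ih d (fun r hr => hk r (List.mem_cons_of_mem _ hr))

-- the outer fold preserves the key list
theorem pv_outer_keys (hours : List (Int × Int)) :
    ∀ (ts : List (Int × Int)) (d : PySem.Dict Int (List Int)),
    (∀ p ∈ hours, p.1 ∈ d.keys) →
    (ts.foldl (fun d q => pvInner q d hours) d).keys = d.keys := by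
  intro ts
  induction ts with
  | nil => intro d _; rfl
  | cons q t ih =>
    intro d hk
    simp only [List.foldl_cons]
    have h1 := pv_inner_keys q hours d hk
    rw [ih _ (fun r hr => h1 ▸ hk r hr), h1]

-- the outer fold's bucket i collects the filtered, projected pairs
theorem pv_outer_getD (hours : List (Int × Int)) (i t0 : Int)
    (hnd : (hours.map Prod.fst).Nodup) (hm : (i, t0) ∈ hours) :
    ∀ (ts : List (Int × Int)) (d : PySem.Dict Int (List Int)),
    (ts.foldl (fun d q => pvInner q d hours) d).getD i []
      = d.getD i [] ++ (ts.filter (fun q => decide (t0 ≤ q.1) && decide (q.1 < t0 + 3600))).map (fun q => q.2) := by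
  intro ts
  induction ts with
  | nil => intro d; simp
  | cons q t ih =>
    intro d
    simp only [List.foldl_cons]
    rw [ih, pv_inner_getD_mem q i t0 hours d hnd hm, List.filter_cons]
    by_cases hc : (decide (t0 ≤ q.1) && decide (q.1 < t0 + 3600)) = true
    · rw [if_pos hc, if_pos hc]
      simp
    · rw [if_neg hc, if_neg hc]

-- B's initial dict: items are ((0:Int),[]) … ((n-1:Int),[])
theorem pv_init_items (n : Nat) :
    ((PySem.List.pyRange 0 (n : Int)).foldl (fun d i => d.insert i ([] : List Int)) PySem.Dict.empty).items
      = (List.range n).map (fun (k : Nat) => ((k : Int), ([] : List Int))) := by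
  rw [PySem.List.pyRange_zero_natCast,
    show (List.range n).map (fun (k : Nat) => ((k : Int), ([] : List Int)))
       = ((List.range n).map (fun (k : Nat) => (k : Int))).map (fun j => (j, ([] : List Int))) from by rw [List.map_map]; rfl]
  have hnod : ((List.range n).map (fun (k : Nat) => (k : Int))).Nodup :=
    List.Nodup.map (fun a b h => by exact_mod_cast h) List.nodup_range
  have := PySem.Dict.items_foldl_insert_fresh (l := (List.range n).map (fun (k : Nat) => (k : Int)))
    (k := fun a => a) (v := fun _ => ([] : List Int)) (d := PySem.Dict.empty)
    (fun a _ => PySem.Dict.contains_empty a) (by simpa using hnod)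
  simpa using this

-- every bucket of B's initial dict is empty
theorem pv_init_getD (n : Nat) (j : Int) :
    ((PySem.List.pyRange 0 (n : Int)).foldl (fun d i => d.insert i ([] : List Int)) PySem.Dict.empty).getD j []
      = [] := by
  set d := (PySem.List.pyRange 0 (n : Int)).foldl (fun d i => d.insert i ([] : List Int)) PySem.Dict.empty with hd
  have hitems : d.items = (List.range n).map (fun (k : Nat) => ((k : Int), ([] : List Int))) := pv_init_items n
  have hkeys : d.keys = (List.range n).map (fun (k : Nat) => (k : Int)) := by
    show d.items.map Prod.fst = _
    rw [hitems, List.map_map]; rfl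
  have hnd : d.keys.Nodup := by
    rw [hkeys]
    exact (List.nodup_range (n := n)).map (fun a b h => by exact_mod_cast h)
  by_cases hj : j ∈ d.keys
  · rw [hkeys] at hj
    obtain ⟨k, hk, rfl⟩ := List.mem_map.1 hj
    have hmemi : ((k : Int), ([] : List Int)) ∈ d.items := by
      rw [hitems]; exact List.mem_map.2 ⟨k, hk, rfl⟩
    exact PySem.Dict.getD_of_mem_items d hmemi hnd []
  · refine PySem.Dict.getD_of_not_contains d [] ?_
    rw [PySem.Dict.contains_eq_decide_mem_keys]
    exact decide_eq_false hj

-- ===== VERDICT (by name: the statement is the Claim_ definition above) =====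
theorem build_hour_to_15m_map_spec : Claim_equal_build_hour_to_15m_map := by
  intro c1h c15m _ _
  unfold Spec_build_hour_to_15m_map build_hour_to_15m_map build_hour_to_15m_map_alt
  by_cases h : c1h = [] ∨ c15m = []
  · simp [h]
  · simp only [h, if_false]
    set ts := PySem.List.sorted ((PySem.List.enumerate c15m).map (fun p => (pvTime p.2, p.1))) (fun x => x.1) with hts
    set hours := PySem.List.enumerate (c1h.map pvTime) with hhours
    set init := (PySem.List.pyRange 0 (c1h.length : Int)).foldl (fun d i => d.insert i ([] : List Int)) PySem.Dict.empty with hinit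
    have hsorted : List.Pairwise (fun p q => p.1 ≤ q.1) ts :=
      PySem.List.sorted_pairwise _ _
    -- hours = enumerate c1h with pvTime applied to the snd
    have hhe : hours = (PySem.List.enumerate c1h).map (fun p => (p.1, pvTime p.2)) :=
      pv_enumerate_map pvTime c1h 0
    have hhf : hours.map Prod.fst = (List.range c1h.length).map (fun (k : Nat) => (k : Int)) := by
      rw [hhours, pv_enumerate_fst, List.length_map]
      exact List.map_congr_left (fun k _ => by simp)
    have hndh : (hours.map Prod.fst).Nodup := by
      rw [hhf]
      exact (List.nodup_range (n := c1h.length)).map (fun a b h => by exact_mod_cast h)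
    -- keys of init and of the final dict
    have hikeys : init.keys = (List.range c1h.length).map (fun (k : Nat) => (k : Int)) := by
      show init.items.map Prod.fst = _
      rw [hinit, pv_init_items, List.map_map]; rfl
    have hkfin : (ts.foldl (fun d q => pvInner q d hours) init).keys = init.keys :=
      pv_outer_keys hours ts init (by
        intro p hp
        rw [hikeys, ← hhf]
        exact List.mem_map.2 ⟨p, hp, rfl⟩)
    have hndfin : (ts.foldl (fun d q => pvInner q d hours) init).keys.Nodup := by
      rw [hkfin, hikeys]
      exact (List.nodup_range (n := c1h.length)).map (fun a b h => by exact_mod_cast h)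
    -- final items as a map over the keys, i.e. over enumerate c1h's indices
    have hitems := PySem.Dict.items_eq_map_keys (ts.foldl (fun d q => pvInner q d hours) init) hndfin ([] : List Int)
    have hkl : hours.map Prod.fst = (PySem.List.enumerate c1h).map (fun p => p.1) := by
      rw [hhe, List.map_map]; rfl
    show _ = (ts.foldl (fun d q => pvInner q d hours) init).items
    rw [hitems, hkfin, hikeys, ← hhf, hkl, List.map_map]
    apply List.map_congr_left
    intro p hp
    simp only [Function.comp]
    have hmem : (p.1, pvTime p.2) ∈ hours := by
      rw [hhe]; exact List.mem_map.2 ⟨p, hp, rfl⟩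
    rw [pv_outer_getD hours p.1 (pvTime p.2) hndh hmem ts init, hinit, pv_init_getD]
    simp only [List.nil_append]
    exact congrArg (fun z => (p.1, z)) (hour_eq ts hsorted (pvTime p.2))
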